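-- pv_equiv track=rewrite | github.com/zhangquan1015/cluster-security-risk-analyze-system | framework/Extracter/filterdatabase.py | filter_remediation
-- ===== SOURCE A (Python) =====
-- def filter_remediation(patchs):
--     if len(patchs) == 0:
--         return "Unavailable"
--     fix = 'Workaround'
--     for patch in patchs:
--         if "Advisory" in patch[0]:
--             if "Offical" in patch[0]:
--                 return "Official Fix"
--             fix = "Third Party Fix"
--     return fix
-- ===== SOURCE B (Python) =====
-- def filter_remediation(patchs):
--     if len(patchs) == 0:
--         return "Unavailable"
--     if any("Advisory" in p[0] and "Offical" in p[0] for p in patchs):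
--         return "Official Fix"
--     if any("Advisory" in p[0] for p in patchs):
--         return "Third Party Fix"
--     return "Workaround"
-- ===== Notes on version B (the rewrite author's own statement) =====
-- stated objective: idiomatic
-- what changed: Replaced A's single early-exit pass with a mutable accumulator by two independent short-circuiting any() priority scans.
-- outside the precondition, e.g. on filter_remediation([('AdvisoryOffical',), ()]): A returns 'Official Fix', B returns 'Official Fix'
import Mathlib
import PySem

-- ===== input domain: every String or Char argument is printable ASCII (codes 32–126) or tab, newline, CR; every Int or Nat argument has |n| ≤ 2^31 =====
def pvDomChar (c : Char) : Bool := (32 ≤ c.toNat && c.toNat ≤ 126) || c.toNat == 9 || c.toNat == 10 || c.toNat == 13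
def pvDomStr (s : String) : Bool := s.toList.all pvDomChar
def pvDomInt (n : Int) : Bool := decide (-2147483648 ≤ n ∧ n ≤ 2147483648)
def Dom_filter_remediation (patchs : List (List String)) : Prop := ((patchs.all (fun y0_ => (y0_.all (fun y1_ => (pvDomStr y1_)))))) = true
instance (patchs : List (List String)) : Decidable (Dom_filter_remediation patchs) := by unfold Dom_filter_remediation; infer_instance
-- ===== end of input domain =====

-- ===== PORT A =====
-- B replaces A's single accumulating early-exit loop by two priority any-scans (idiomatic decomposition).
-- Both ports read patch[0] via pyGetD; Pre_ keeps every patch nonempty so this is IndexError-free.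
def filterLoopA : List (List String) → String → String
  | [], fix => fix
  | patch :: rest, fix =>
    if PySem.Str.isIn "Advisory" (PySem.List.pyGetD patch 0 "") then
      if PySem.Str.isIn "Offical" (PySem.List.pyGetD patch 0 "") then "Official Fix"
      else filterLoopA rest "Third Party Fix"
    else filterLoopA rest fix

def filter_remediation (patchs : List (List String)) : String :=
  if patchs.length = 0 then "Unavailable"
  else filterLoopA patchs "Workaround"

-- ===== PORT B =====
def filter_remediation_alt (patchs : List (List String)) : String :=
  if patchs.length = 0 then "Unavailable"
  else if patchs.any (fun p => PySem.Str.isIn "Advisory" (PySem.List.pyGetD p 0 "")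
                        && PySem.Str.isIn "Offical" (PySem.List.pyGetD p 0 "")) then "Official Fix"
  else if patchs.any (fun p => PySem.Str.isIn "Advisory" (PySem.List.pyGetD p 0 "")) then "Third Party Fix"
  else "Workaround"

-- ===== PRECONDITION & SPEC =====
-- Pre_ excludes lists containing an empty patch entry: both programs raise IndexError on patch[0]
-- there except when an official patch precedes the empty entry, in which case both still return "Official Fix".
def Pre_filter_remediation (patchs : List (List String)) : Prop :=
  ∀ p ∈ patchs, p ≠ []
instance (patchs : List (List String)) : Decidable (Pre_filter_remediation patchs) := by unfold Pre_filter_remediation; infer_instance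
def pvWitness_filter_remediation : List (List String) := [["Advisory patch"], ["none"]]

def Spec_filter_remediation (patchs : List (List String)) (out : String) : Prop := out = filter_remediation_alt patchs
instance (patchs : List (List String)) (out : String) : Decidable (Spec_filter_remediation patchs out) := by unfold Spec_filter_remediation; infer_instance

-- ===== CLAIM (what is proved, stated in full; the proofs are below) =====
def Claim_equal_filter_remediation : Prop := ∀ (patchs : List (List String)), Dom_filter_remediation patchs → Pre_filter_remediation patchs → Spec_filter_remediation patchs (filter_remediation patchs)

-- ===== LEMMAS AND PROOFS =====
theorem filterLoopA_eq (l : List (List String)) (fix : String) :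
    filterLoopA l fix =
      if l.any (fun p => PySem.Str.isIn "Advisory" (PySem.List.pyGetD p 0 "")
                  && PySem.Str.isIn "Offical" (PySem.List.pyGetD p 0 "")) then "Official Fix"
      else if l.any (fun p => PySem.Str.isIn "Advisory" (PySem.List.pyGetD p 0 "")) then "Third Party Fix"
      else fix := by
  induction l generalizing fix with
  | nil => simp [filterLoopA]
  | cons p rest ih =>
    cases ha : PySem.Str.isIn "Advisory" (PySem.List.pyGetD p 0 "") <;>
      cases ho : PySem.Str.isIn "Offical" (PySem.List.pyGetD p 0 "") <;>
        simp only [filterLoopA, List.any_cons, ha, ho, Bool.false_and, Bool.true_and,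
          Bool.false_or, Bool.true_or, if_true, ih] <;> split_ifs <;> simp_all

-- ===== VERDICT (by name: the statement is the Claim_ definition above) =====
theorem filter_remediation_spec : Claim_equal_filter_remediation := by
  intro patchs _ _
  unfold Spec_filter_remediation filter_remediation filter_remediation_alt
  by_cases h : patchs.length = 0
  · simp [h]
  · simp [h, filterLoopA_eq]
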